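-- pv_equiv track=rewrite | github.com/zwmuam/lysin_vocabulary | Select_representative_models.py | shrink_exhaustively
-- ===== SOURCE A (Python) =====
-- from typing import Dict, Set, Tuple
--
-- def shrink_exhaustively(preselected_models: Tuple = None,
--                         model_hits_in_positive: Dict[str, Set[str]] = None,
--                         find_at_least: int = None) -> Set[Tuple[str]]:
--     """
--     Brute-force through all possible subsets of the model set to find the smallest arrangements that meet the "find_at_least" criterion.
--     :param preselected_models: tuple with combination of preliminary selected models to refine
--     :param model_hits_in_positive: dictionary with sets of proteins from positive (e.g. enzymatically active) dataset that are recognized by different HMMs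
--                                    {hmm_0: {protein.a, protein.c, (...) protein.z}, hmm_N: {protein.b, protein.f, (...) protein.x}}
--     :param find_at_least: minimal number of proteins that align to set of models
--                           (sets of HMMs that don't match this number are discarded)
--     :return: all sub-combinations of initial model set that meet "find_at_least" criterion
--              {(hmm_3, hmm_12, hmm_34, ... ),
--               (...),
--               (hmm_3, hmm_8, hmm_44, ... )}
--     """
--     if preselected_models is not None:
--         model_hits_in_positive = {model: proteins for model, proteins in model_hits_in_positive.items() if model in preselected_models}
--     proteins_found = len(set([protein for model in model_hits_in_positive.values() for protein in model]))
--     if proteins_found < find_at_least: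
--         return set()
--     else:
--         result = {tuple(sorted(model_hits_in_positive.keys()))}
--         for model_to_drop in model_hits_in_positive:
--             result.update(shrink_exhaustively(model_hits_in_positive={model: proteins for model, proteins in model_hits_in_positive.items() if model != model_to_drop},
--                                               find_at_least=find_at_least))
--         return result
-- ===== SOURCE B (Python) =====
-- def shrink_exhaustively(preselected_models=None, model_hits_in_positive=None, find_at_least=None):
--     # DFS with a visited set: each subset of models (identified by its key tuple in dict order)
--     # is expanded at most once, instead of once per drop-order as in the recursive version.
--     if preselected_models is not None:
--         model_hits_in_positive = {m: p for m, p in model_hits_in_positive.items() if m in preselected_models}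
--     seen = set()
--     out = []
--
--     def visit(keys):
--         state = tuple(keys)
--         if state in seen:
--             return
--         seen.add(state)
--         covered = set()
--         for m in keys:
--             covered.update(model_hits_in_positive[m])
--         if len(covered) < find_at_least:
--             return
--         out.append(tuple(sorted(keys)))
--         for m in keys:
--             visit([x for x in keys if x != m])
--
--     visit(list(model_hits_in_positive))
--     return set(out)
-- ===== Notes on version B (the rewrite author's own statement) =====
-- stated objective: alternative
-- what changed: A re-explores every subset once per drop-order via recursive dict rebuilding; B does a DFS over model-key subsets with a visited set, so each subset is expanded at most once (same cost on inputs pruned by the threshold).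
import Mathlib
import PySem

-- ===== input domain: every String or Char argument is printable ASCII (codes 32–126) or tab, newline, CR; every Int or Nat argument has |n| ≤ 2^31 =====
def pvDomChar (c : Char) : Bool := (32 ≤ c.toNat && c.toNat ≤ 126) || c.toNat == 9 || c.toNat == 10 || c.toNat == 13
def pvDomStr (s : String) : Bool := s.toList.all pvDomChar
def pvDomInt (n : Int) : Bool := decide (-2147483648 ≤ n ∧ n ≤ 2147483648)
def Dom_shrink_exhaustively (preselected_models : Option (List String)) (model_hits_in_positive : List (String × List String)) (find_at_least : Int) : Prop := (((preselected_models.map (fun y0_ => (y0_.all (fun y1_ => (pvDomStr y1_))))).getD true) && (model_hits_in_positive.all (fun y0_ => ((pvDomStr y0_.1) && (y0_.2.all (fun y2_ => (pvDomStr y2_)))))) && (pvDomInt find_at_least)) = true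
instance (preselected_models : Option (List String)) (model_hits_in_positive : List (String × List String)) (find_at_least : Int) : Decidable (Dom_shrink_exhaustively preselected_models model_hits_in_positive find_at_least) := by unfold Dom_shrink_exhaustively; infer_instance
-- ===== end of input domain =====

-- B replaces A's drop-order recursion (each drop order explored separately, rebuilding
-- sub-dictionaries) with a DFS over model-key subsets guarded by a visited set, so every
-- subset is expanded at most once.

-- ===== PORT A =====
-- A's dict comprehensions over .items() are ported as List.filter on the association list;
-- this is exact for duplicate-free key lists (the only lists representing a Python dict — see Pre_).
def pvProteinsFound (d : List (String × List String)) : Int :=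
  ((PySem.Set.ofList (d.flatMap Prod.snd)).length : Int)

def pvShrinkA (d : List (String × List String)) (find_at_least : Int) : List (List String) :=
  if pvProteinsFound d < find_at_least then PySem.Set.empty
  else
    (d.map Prod.fst).attach.foldl
      (fun result m => PySem.Set.update result
        (pvShrinkA (d.filter (fun p => p.1 ≠ m.1)) find_at_least))
      (PySem.Set.ofList [PySem.List.sorted (d.map Prod.fst) (fun x => x) false])
termination_by d.length
decreasing_by
  simp only [List.length_unattach, ← List.length_attach (l := d)]
  apply List.length_filter_lt_length_iff_exists.mpr
  obtain ⟨p, hp, hp1⟩ := List.mem_map.mp m.2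
  exact ⟨⟨p, hp⟩, List.mem_attach _ _, by simp [hp1]⟩

def shrink_exhaustively (preselected_models : Option (List String)) (model_hits_in_positive : List (String × List String)) (find_at_least : Int) : List (List String) :=
  let d := match preselected_models with
    | some ps => model_hits_in_positive.filter (fun p => ps.contains p.1)
    | none => model_hits_in_positive
  pvShrinkA d find_at_least

-- ===== PORT B =====
-- len(covered) after 'for m in keys: covered.update(model_hits_in_positive[m])'.
-- Every m in keys is a key of the dict when this runs, so the getD default is never read.
def pvCovB (d : List (String × List String)) (keys : List String) : Int :=
  ((keys.foldl
      (fun covered m => PySem.Set.update covered (PySem.Dict.getD (PySem.Dict.mk d) m []))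
      PySem.Set.empty).length : Int)

-- visit(keys) threading the mutable (seen, out) state
def pvVisitB (d : List (String × List String)) (find_at_least : Int)
    (keys : List String) (st : List (List String) × List (List String)) :
    List (List String) × List (List String) :=
  if PySem.Set.contains st.1 keys then st
  else if pvCovB d keys < find_at_least then (PySem.Set.add st.1 keys, st.2)
  else
    keys.attach.foldl
      (fun st2 m => pvVisitB d find_at_least (keys.filter (fun x => x ≠ m.1)) st2)
      (PySem.Set.add st.1 keys, st.2 ++ [PySem.List.sorted keys (fun x => x) false])
termination_by keys.length
decreasing_by
  simp only [List.length_unattach, ← List.length_attach (l := keys)]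
  apply List.length_filter_lt_length_iff_exists.mpr
  exact ⟨m, List.mem_attach _ _, by simp⟩

def shrink_exhaustively_alt (preselected_models : Option (List String)) (model_hits_in_positive : List (String × List String)) (find_at_least : Int) : List (List String) :=
  let d := match preselected_models with
    | some ps => model_hits_in_positive.filter (fun p => ps.contains p.1)
    | none => model_hits_in_positive
  PySem.Set.ofList (pvVisitB d find_at_least (d.map Prod.fst) (PySem.Set.empty, [])).2

-- ===== PRECONDITION & SPEC =====
-- Pre_ excludes association lists with duplicate model keys: they do not represent any Python
-- dict (dict keys are unique), so Python's shrink_exhaustively never receives such an input.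
def Pre_shrink_exhaustively (preselected_models : Option (List String)) (model_hits_in_positive : List (String × List String)) (find_at_least : Int) : Prop :=
  (model_hits_in_positive.map Prod.fst).Nodup
instance (preselected_models : Option (List String)) (model_hits_in_positive : List (String × List String)) (find_at_least : Int) : Decidable (Pre_shrink_exhaustively preselected_models model_hits_in_positive find_at_least) := by unfold Pre_shrink_exhaustively; infer_instance

def pvWitness_shrink_exhaustively : Option (List String) × (List (String × List String)) × Int :=
  (none, [("hmm_a", ["p", "q"]), ("hmm_b", ["q"])], 1)

def Spec_shrink_exhaustively (preselected_models : Option (List String)) (model_hits_in_positive : List (String × List String)) (find_at_least : Int) (out : List (List String)) : Prop := out = shrink_exhaustively_alt preselected_models model_hits_in_positive find_at_least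
instance (preselected_models : Option (List String)) (model_hits_in_positive : List (String × List String)) (find_at_least : Int) (out : List (List String)) : Decidable (Spec_shrink_exhaustively preselected_models model_hits_in_positive find_at_least out) := by unfold Spec_shrink_exhaustively; infer_instance

-- ===== CLAIM (what is proved, stated in full; the proofs are below) =====
def Claim_equal_shrink_exhaustively : Prop := ∀ (preselected_models : Option (List String)) (model_hits_in_positive : List (String × List String)) (find_at_least : Int), Dom_shrink_exhaustively preselected_models model_hits_in_positive find_at_least → Pre_shrink_exhaustively preselected_models model_hits_in_positive find_at_least → Spec_shrink_exhaustively preselected_models model_hits_in_positive find_at_least (shrink_exhaustively preselected_models model_hits_in_positive find_at_least)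

-- ===== LEMMAS AND PROOFS =====

-- abbreviation for tuple(sorted(keys))
def pvSortedI (s : List String) : List String := PySem.List.sorted s (fun x => x) false

-- A's recursion re-expressed on the key list alone (bridged to pvShrinkA by pvABridge)
def pvFK (d : List (String × List String)) (k : Int) (s : List String) : List (List String) :=
  if pvCovB d s < k then []
  else
    s.attach.foldl
      (fun res m => PySem.Set.update res (pvFK d k (s.filter (fun x => x ≠ m.1))))
      (PySem.Set.ofList [pvSortedI s])
termination_by s.length
decreasing_by
  simp only [List.length_unattach, ← List.length_attach (l := s)]
  apply List.length_filter_lt_length_iff_exists.mpr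
  exact ⟨m, List.mem_attach _ _, by simp⟩

def pvGood (d : List (String × List String)) (k : Int) (s : List String) : Prop :=
  ¬ pvCovB d s < k

-- invariant tying the visited-set to the emitted tuples
def pvInv (d : List (String × List String)) (k : Int) (K : List String)
    (seen out : List (List String)) : Prop :=
  (∀ t ∈ seen, t.Sublist K) ∧
  (∀ u ∈ out, ∃ t ∈ seen, pvGood d k t ∧ u = pvSortedI t) ∧
  (∀ t ∈ seen, pvGood d k t → pvSortedI t ∈ out)

-- every good visited state of length ≤ n has all its children visited
def pvClosed (d : List (String × List String)) (k : Int)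
    (seen : List (List String)) (n : Nat) : Prop :=
  ∀ t ∈ seen, t.length ≤ n → pvGood d k t → ∀ m ∈ t, t.filter (fun x => x ≠ m) ∈ seen

theorem pvClosed_mono (d : List (String × List String)) (k : Int)
    (seen : List (List String)) {n n' : Nat} (h : n' ≤ n)
    (hc : pvClosed d k seen n) : pvClosed d k seen n' :=
  fun t ht hl => hc t ht (le_trans hl h)

theorem pvFilterNe_sublist (s : List String) (m : String) :
    (s.filter (fun x => x ≠ m)).Sublist s := List.filter_sublist

theorem pvFilterNe_len_lt (s : List String) (m : String) (hm : m ∈ s) :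
    (s.filter (fun x => x ≠ m)).length < s.length := by
  apply List.length_filter_lt_length_iff_exists.mpr
  exact ⟨m, hm, by simp⟩

theorem pvFilterNeLenNodup (s : List String) (m : String) (hs : s.Nodup) (hm : m ∈ s) :
    (s.filter (fun x => x ≠ m)).length = s.length - 1 := by
  have h1 : s.filter (fun x => x ≠ m) = s.erase m := by
    rw [hs.erase_eq_filter m]
    apply List.filter_congr
    intro x _
    simp [bne]
    exact Eq.symm (Bool.beq_eq_decide_eq x m)
  rw [h1]
  exact List.length_erase_of_mem hm

theorem pvSortedInj (K : List String) (hK : K.Nodup) (s t : List String)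
    (hs : s.Sublist K) (ht : t.Sublist K) (h : pvSortedI s = pvSortedI t) : s = t := by
  have hp : s.Perm t := by
    have h1 := (PySem.List.sorted_perm s (fun x => x) false).symm
    rw [show PySem.List.sorted s (fun x => x) false = pvSortedI s from rfl, h] at h1
    exact h1.trans (PySem.List.sorted_perm t (fun x => x) false)
  exact (List.Nodup.perm_iff_eq_of_sublist hK hs ht).mp hp

-- membership in a foldl of set-updates
theorem pvMemFoldlUpdate {β : Type} [BEq β] [LawfulBEq β] :
    ∀ (l : List (List β)) (z : List β) (u : β),
      u ∈ l.foldl PySem.Set.update z → u ∈ z ∨ ∃ b ∈ l, u ∈ b := by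
  intro l
  induction l with
  | nil => intro z u h; exact Or.inl h
  | cons b l ih =>
    intro z u h
    rcases ih _ u h with h' | ⟨c, hc, hu⟩
    · rcases (PySem.Set.mem_update z b u).mp h' with h'' | h''
      · exact Or.inl h''
      · exact Or.inr ⟨b, List.mem_cons_self .., h''⟩
    · exact Or.inr ⟨c, List.mem_cons_of_mem _ hc, hu⟩

theorem pvFoldlUpdateNodup {β : Type} [BEq β] [LawfulBEq β] :
    ∀ (l : List (List β)) (z : List β), z.Nodup → (l.foldl PySem.Set.update z).Nodup := by
  intro l
  induction l with
  | nil => intro z h; exact h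
  | cons b l ih => intro z h; exact ih _ (PySem.Set.nodup_update z b h)

theorem pvFK_bad (d : List (String × List String)) (k : Int) (s : List String)
    (h : pvCovB d s < k) : pvFK d k s = [] := by
  rw [pvFK, if_pos h]

theorem pvFK_good (d : List (String × List String)) (k : Int) (s : List String)
    (h : ¬ pvCovB d s < k) :
    pvFK d k s =
      (s.map (fun m => pvFK d k (s.filter (fun x => x ≠ m)))).foldl PySem.Set.update
        (PySem.Set.ofList [pvSortedI s]) := by
  rw [pvFK, if_neg h,
    List.foldl_attach (f := fun res m => PySem.Set.update res (pvFK d k (List.filter (fun x => decide (x ≠ m)) s))),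
    List.foldl_map]

theorem pvFKNodup (d : List (String × List String)) (k : Int) (s : List String) :
    (pvFK d k s).Nodup := by
  by_cases h : pvCovB d s < k
  · rw [pvFK_bad d k s h]; exact List.nodup_nil
  · rw [pvFK_good d k s h]
    exact pvFoldlUpdateNodup _ _ (PySem.Set.nodup_ofList [pvSortedI s])

theorem pvUpdNodup {β : Type} [BEq β] [LawfulBEq β] (s b : List β) (hb : b.Nodup) :
    PySem.Set.update s b = s ++ b.filter (fun y => !(s.contains y)) := by
  rw [PySem.Set.update_eq_append_filter, PySem.Set.ofList_eq_self_of_nodup b hb]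
  simp [PySem.Set.contains_eq_listContains]

-- folding updates over a prefix-extended accumulator
theorem pvL {β : Type} [BEq β] [LawfulBEq β] :
    ∀ (l : List (List β)), (∀ b ∈ l, b.Nodup) → ∀ (x z : List β),
      l.foldl PySem.Set.update (x ++ z.filter (fun c => !(x.contains c))) =
        x ++ (l.foldl PySem.Set.update z).filter (fun c => !(x.contains c)) := by
  intro l
  induction l with
  | nil => intro _ x z; rfl
  | cons b l ih =>
    intro hn x z
    have hb : b.Nodup := hn b (List.mem_cons_self ..)
    have step : PySem.Set.update (x ++ z.filter (fun c => !(x.contains c))) b =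
        x ++ (PySem.Set.update z b).filter (fun c => !(x.contains c)) := by
      rw [pvUpdNodup _ b hb, pvUpdNodup z b hb, List.append_assoc]
      congr 1
      rw [List.filter_append, List.filter_filter]
      congr 1
      apply List.filter_congr
      intro c _
      by_cases hx : c ∈ x <;> by_cases hz : c ∈ z <;>
        simp [hx, hz, List.contains_eq_mem, List.mem_filter]
    simp only [List.foldl_cons]
    rw [step]
    exact ih (fun b' hb' => hn b' (List.mem_cons_of_mem _ hb')) x (PySem.Set.update z b)

-- pvCovB as a set of the concatenated protein lists
theorem pvFoldlUpdateOfList {α β : Type} [BEq β] [LawfulBEq β] (f : α → List β) :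
    ∀ (l : List α) (c : List β),
      l.foldl (fun cov m => PySem.Set.update cov (f m)) (PySem.Set.ofList c) =
        PySem.Set.ofList (c ++ l.flatMap f) := by
  intro l
  induction l with
  | nil => intro c; simp
  | cons a l ih =>
    intro c
    simp only [List.foldl_cons, List.flatMap_cons]
    rw [← PySem.Set.ofList_append, ih (c ++ f a), List.append_assoc]

theorem pvCovBEq (d : List (String × List String)) (s : List String) :
    pvCovB d s =
      ((PySem.Set.ofList (s.flatMap (fun m => PySem.Dict.getD (PySem.Dict.mk d) m []))).length : Int) := by
  unfold pvCovB
  rw [show (PySem.Set.empty : PySem.Set String) = PySem.Set.ofList [] from rfl,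
      pvFoldlUpdateOfList]
  simp

-- the sub-dictionary determined by a key sublist
theorem pvGetD_cons (a : String) (v : List String) (d : List (String × List String)) :
    PySem.Dict.getD (PySem.Dict.mk ((a, v) :: d)) a [] = v := by
  rw [PySem.Dict.getD_eq_get?_getD, PySem.Dict.get?_mk_cons]; simp

theorem pvGetD_cons_ne (a m : String) (v : List String) (d : List (String × List String))
    (h : m ≠ a) :
    PySem.Dict.getD (PySem.Dict.mk ((a, v) :: d)) m [] = PySem.Dict.getD (PySem.Dict.mk d) m [] := by
  rw [PySem.Dict.getD_eq_get?_getD, PySem.Dict.get?_mk_cons, PySem.Dict.getD_eq_get?_getD]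
  simp [Ne.symm h]

theorem pvSubEqMap :
    ∀ (d : List (String × List String)), (d.map Prod.fst).Nodup →
    ∀ (s : List String), s.Sublist (d.map Prod.fst) →
      d.filter (fun p => s.contains p.1) =
        s.map (fun m => (m, PySem.Dict.getD (PySem.Dict.mk d) m [])) := by
  intro d
  induction d with
  | nil =>
    intro _ s hs
    simp only [List.map_nil, List.sublist_nil] at hs
    simp [hs]
  | cons pv d ih =>
    intro hK s hs
    obtain ⟨a, v⟩ := pv
    simp only [List.map_cons, List.nodup_cons] at hK
    obtain ⟨ha, hK'⟩ := hK
    rcases List.sublist_cons_iff.mp hs with h | ⟨r, rfl, hr⟩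
    · -- a does not occur in s
      have has : a ∉ s := fun hmem => ha (h.subset hmem)
      have hc : (s.contains ((a, v) : String × List String).1) = false := by
        simp [List.contains_eq_mem, has]
      rw [List.filter_cons, hc, if_neg (by simp), ih hK' s h]
      apply List.map_congr_left
      intro m hm
      have hma : m ≠ a := fun e => has (e ▸ hm)
      rw [pvGetD_cons_ne a m v d hma]
    · -- s = a :: r
      have har : a ∉ r := fun hmem => ha (hr.subset hmem)
      have hc : (((a :: r).contains ((a, v) : String × List String).1)) = true := by simp
      rw [List.filter_cons, hc, if_pos rfl]
      have htail : d.filter (fun p => (a :: r).contains p.1) = d.filter (fun p => r.contains p.1) := by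
        apply List.filter_congr
        intro p hp
        have hpa : p.1 ≠ a := fun e => ha (e ▸ List.mem_map_of_mem hp)
        simp [List.contains_eq_mem, hpa]
      rw [htail, ih hK' r hr, List.map_cons, pvGetD_cons]
      congr 1
      apply List.map_congr_left
      intro m hm
      have hma : m ≠ a := fun e => har (e ▸ hm)
      rw [pvGetD_cons_ne a m v d hma]

theorem pvSubSelf (d : List (String × List String)) :
    d.filter (fun p => (d.map Prod.fst).contains p.1) = d := by
  apply List.filter_eq_self.mpr
  intro p hp
  simp only [List.contains_eq_mem, decide_eq_true_eq]
  exact List.mem_map_of_mem hp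

-- A's recursion equals the key-list recursion
theorem pvABridge (d : List (String × List String)) (k : Int) (hK : (d.map Prod.fst).Nodup) :
    ∀ (n : Nat) (s : List String), s.length ≤ n → s.Sublist (d.map Prod.fst) →
      pvShrinkA (d.filter (fun p => s.contains p.1)) k = pvFK d k s := by
  intro n
  induction n using Nat.strong_induction_on with
  | _ n ih =>
  intro s hl hs
  have hsub := pvSubEqMap d hK s hs
  have hkeys : (d.filter (fun p => s.contains p.1)).map Prod.fst = s := by
    rw [hsub, List.map_map]
    exact List.map_id s
  have hcov : pvProteinsFound (d.filter (fun p => s.contains p.1)) = pvCovB d s := by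
    rw [hsub]
    unfold pvProteinsFound
    rw [pvCovBEq, List.flatMap_map]
  rw [pvShrinkA, hcov, hkeys]
  by_cases h : pvCovB d s < k
  · rw [if_pos h, pvFK_bad d k s h]; rfl
  · rw [if_neg h, pvFK_good d k s h,
      List.foldl_attach (f := fun res m => PySem.Set.update res
        (pvShrinkA ((d.filter (fun p => s.contains p.1)).filter (fun p => decide (p.1 ≠ m))) k)),
      List.foldl_map]
    show s.foldl _ (PySem.Set.ofList [pvSortedI s]) = s.foldl _ (PySem.Set.ofList [pvSortedI s])
    apply PySem.List.foldl_congr_mem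
    intro acc m hm
    congr 1
    have hfilt : (d.filter (fun p => s.contains p.1)).filter (fun p => decide (p.1 ≠ m)) =
        d.filter (fun p => (s.filter (fun x => x ≠ m)).contains p.1) := by
      rw [hsub, List.filter_map, pvSubEqMap d hK (s.filter (fun x => x ≠ m))
        ((pvFilterNe_sublist s m).trans hs)]
      rfl
    rw [hfilt]
    have hlt := pvFilterNe_len_lt s m hm
    exact ih (s.filter (fun x => x ≠ m)).length (by omega) _ le_rfl
      ((pvFilterNe_sublist s m).trans hs)

-- emitted tuples of an already-visited good state are already in out
theorem pvEmitted (d : List (String × List String)) (k : Int) (K : List String) (hK : K.Nodup) :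
    ∀ (n : Nat) (s : List String), s.length ≤ n → s.Sublist K → ∀ seen out, s ∈ seen →
      pvInv d k K seen out → pvClosed d k seen s.length →
      ∀ u ∈ pvFK d k s, u ∈ out := by
  intro n
  induction n using Nat.strong_induction_on with
  | _ n ih =>
  intro s hl hs seen out hmem hinv hcl u hu
  by_cases h : pvCovB d s < k
  · rw [pvFK_bad d k s h] at hu; cases hu
  · rw [pvFK_good d k s h] at hu
    rcases pvMemFoldlUpdate _ _ _ hu with hbase | ⟨b, hb, hub⟩
    · have : u = pvSortedI s := by
        simpa using (PySem.Set.mem_ofList [pvSortedI s] u).mp hbase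
      exact this ▸ hinv.2.2 s hmem h
    · obtain ⟨m, hm, rfl⟩ := List.mem_map.mp hb
      have hlt := pvFilterNe_len_lt s m hm
      exact ih (s.filter (fun x => x ≠ m)).length (by omega) _ le_rfl
        ((pvFilterNe_sublist s m).trans hs) seen out
        (hcl s hmem le_rfl h m hm) hinv
        (pvClosed_mono d k seen (by omega) hcl) u hub

-- main invariant lemma for the DFS
theorem pvMain (d : List (String × List String)) (k : Int) (K : List String) (hK : K.Nodup) :
    ∀ (n : Nat) (s : List String), s.length ≤ n → s.Sublist K → ∀ seen out,
      pvInv d k K seen out → pvClosed d k seen s.length →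
      (pvVisitB d k s (seen, out)).2 = out ++ (pvFK d k s).filter (fun u => !(out.contains u))
      ∧ (∀ t ∈ seen, t ∈ (pvVisitB d k s (seen, out)).1)
      ∧ s ∈ (pvVisitB d k s (seen, out)).1
      ∧ (∀ t ∈ (pvVisitB d k s (seen, out)).1, t ∈ seen ∨ t.Sublist s)
      ∧ pvInv d k K (pvVisitB d k s (seen, out)).1 (pvVisitB d k s (seen, out)).2
      ∧ pvClosed d k (pvVisitB d k s (seen, out)).1 s.length := by
  intro n
  induction n using Nat.strong_induction_on with
  | _ n ih =>
  intro s hl hs seen out hinv hcl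
  by_cases hseen : PySem.Set.contains seen s
  · -- state already visited: nothing changes
    have hres : pvVisitB d k s (seen, out) = (seen, out) := by
      rw [pvVisitB, if_pos hseen]
    rw [hres]
    have hmem : s ∈ seen := (PySem.Set.contains_iff seen s).mp hseen
    refine ⟨?_, fun t ht => ht, hmem, fun t ht => Or.inl ht, hinv, hcl⟩
    have hfe : (pvFK d k s).filter (fun u => !(out.contains u)) = [] := by
      apply List.filter_eq_nil_iff.mpr
      intro u hu
      have := pvEmitted d k K hK s.length s le_rfl hs seen out hmem hinv hcl u hu
      simp [List.contains_eq_mem, this]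
    rw [hfe, List.append_nil]
  · have hsnot : s ∉ seen := fun hmem => hseen ((PySem.Set.contains_iff seen s).mpr hmem)
    have hadd : PySem.Set.add seen s = seen ++ [s] := PySem.Set.add_of_not_mem hsnot
    by_cases hcov : pvCovB d s < k
    · -- below the threshold: marked visited, nothing emitted
      have hres : pvVisitB d k s (seen, out) = (seen ++ [s], out) := by
        rw [pvVisitB, if_neg hseen, if_pos hcov, hadd]
      rw [hres]
      refine ⟨?_, ?_, ?_, ?_, ⟨?_, ?_, ?_⟩, ?_⟩
      · rw [pvFK_bad d k s hcov]; simp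
      · intro t ht; exact List.mem_append_left _ ht
      · exact List.mem_append_right _ (List.mem_singleton.mpr rfl)
      · intro t ht
        rcases List.mem_append.mp ht with h | h
        · exact Or.inl h
        · exact Or.inr (List.mem_singleton.mp h ▸ List.Sublist.refl _)
      · intro t ht
        rcases List.mem_append.mp ht with h | h
        · exact hinv.1 t h
        · obtain rfl := List.mem_singleton.mp h; exact hs
      · intro u hu
        obtain ⟨t, ht, hg, he⟩ := hinv.2.1 u hu
        exact ⟨t, List.mem_append_left _ ht, hg, he⟩
      · intro t ht hg
        rcases List.mem_append.mp ht with h | h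
        · exact hinv.2.2 t h hg
        · obtain rfl := List.mem_singleton.mp h; exact absurd hcov hg
      · intro t ht htl hg m hm
        rcases List.mem_append.mp ht with h | h
        · exact List.mem_append_left _ (hcl t h htl hg m hm)
        · obtain rfl := List.mem_singleton.mp h; exact absurd hcov hg
    · -- expand the state
      have hgood : pvGood d k s := hcov
      have hnodupS : s.Nodup := hs.nodup hK
      have hsortednot : pvSortedI s ∉ out := by
        intro hmem
        obtain ⟨t, htseen, _, he⟩ := hinv.2.1 _ hmem
        exact hsnot ((pvSortedInj K hK s t hs (hinv.1 t htseen) he) ▸ htseen)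
      have hres : pvVisitB d k s (seen, out) =
          s.foldl (fun st2 m => pvVisitB d k (s.filter (fun x => x ≠ m)) st2)
            (seen ++ [s], out ++ [pvSortedI s]) := by
        rw [pvVisitB, if_neg hseen, if_neg hcov, hadd,
          List.foldl_attach (f := fun st2 m =>
            pvVisitB d k (List.filter (fun x => decide (x ≠ m)) s) st2)]
        rfl
      have hinv1 : pvInv d k K (seen ++ [s]) (out ++ [pvSortedI s]) := by
        refine ⟨?_, ?_, ?_⟩
        · intro t ht
          rcases List.mem_append.mp ht with h | h
          · exact hinv.1 t h
          · obtain rfl := List.mem_singleton.mp h; exact hs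
        · intro u hu
          rcases List.mem_append.mp hu with h | h
          · obtain ⟨t, ht, hg, he⟩ := hinv.2.1 u h
            exact ⟨t, List.mem_append_left _ ht, hg, he⟩
          · exact ⟨s, List.mem_append_right _ (List.mem_singleton.mpr rfl), hgood,
              List.mem_singleton.mp h⟩
        · intro t ht hg
          rcases List.mem_append.mp ht with h | h
          · exact List.mem_append_left _ (hinv.2.2 t h hg)
          · obtain rfl := List.mem_singleton.mp h
            exact List.mem_append_right _ (List.mem_singleton.mpr rfl)
      have hcl1 : pvClosed d k (seen ++ [s]) (s.length - 1) := by
        intro t ht htl hg m hm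
        rcases List.mem_append.mp ht with h | h
        · exact List.mem_append_left _ (hcl t h (by omega) hg m hm)
        · exfalso
          obtain rfl := List.mem_singleton.mp h
          have h0 : 0 < t.length := List.length_pos_of_mem hm
          omega
      have inner : ∀ (ms : List String), (∀ m ∈ ms, m ∈ s) →
          ∀ (seenA outA : List (List String)), pvInv d k K seenA outA →
            pvClosed d k seenA (s.length - 1) →
            ∀ st', st' = ms.foldl (fun st2 m => pvVisitB d k (s.filter (fun x => x ≠ m)) st2)
                (seenA, outA) →
              st'.2 = ms.foldl (fun o m => PySem.Set.update o (pvFK d k (s.filter (fun x => x ≠ m)))) outA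
              ∧ (∀ t ∈ seenA, t ∈ st'.1)
              ∧ (∀ m ∈ ms, s.filter (fun x => x ≠ m) ∈ st'.1)
              ∧ (∀ t ∈ st'.1, t ∈ seenA ∨ t.Sublist s)
              ∧ pvInv d k K st'.1 st'.2
              ∧ pvClosed d k st'.1 (s.length - 1) := by
        intro ms
        induction ms with
        | nil =>
          intro _ seenA outA hinvA hclA st' hst'
          subst hst'
          exact ⟨rfl, fun t ht => ht, fun m hm => absurd hm (List.not_mem_nil),
            fun t ht => Or.inl ht, hinvA, hclA⟩
        | cons m ms ihm =>
          intro hms seenA outA hinvA hclA st' hst'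
          have hm : m ∈ s := hms m (List.mem_cons_self ..)
          have hlt := pvFilterNe_len_lt s m hm
          have hchild_sub : (s.filter (fun x => x ≠ m)).Sublist K :=
            (pvFilterNe_sublist s m).trans hs
          obtain ⟨e1, e2, e3, e4, e5, e6⟩ :=
            ih (s.filter (fun x => x ≠ m)).length (by omega) _ le_rfl hchild_sub seenA outA hinvA
              (pvClosed_mono d k seenA (by omega) hclA)
          have hlen1 : (s.filter (fun x => x ≠ m)).length = s.length - 1 :=
            pvFilterNeLenNodup s m hnodupS hm
          have e6' : pvClosed d k (pvVisitB d k (s.filter (fun x => x ≠ m)) (seenA, outA)).1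
              (s.length - 1) := by
            rw [← hlen1]; exact e6
          have hout_upd : (pvVisitB d k (s.filter (fun x => x ≠ m)) (seenA, outA)).2 =
              PySem.Set.update outA (pvFK d k (s.filter (fun x => x ≠ m))) := by
            rw [e1, pvUpdNodup outA _ (pvFKNodup d k _)]
          obtain ⟨f1, f2, f3, f4, f5, f6⟩ :=
            ihm (fun m' hm' => hms m' (List.mem_cons_of_mem _ hm'))
              (pvVisitB d k (s.filter (fun x => x ≠ m)) (seenA, outA)).1
              (pvVisitB d k (s.filter (fun x => x ≠ m)) (seenA, outA)).2
              e5 e6' st' (by rw [hst']; simp only [List.foldl_cons])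
          refine ⟨?_, ?_, ?_, ?_, f5, f6⟩
          · rw [f1, hout_upd]; simp only [List.foldl_cons]
          · intro t ht; exact f2 t (e2 t ht)
          · intro m' hm'
            rcases List.mem_cons.mp hm' with rfl | h
            · exact f2 _ e3
            · exact f3 m' h
          · intro t ht
            rcases f4 t ht with h | h
            · rcases e4 t h with h' | h'
              · exact Or.inl h'
              · exact Or.inr (h'.trans (pvFilterNe_sublist s m))
            · exact Or.inr h
      obtain ⟨g1, g2, g3, g4, g5, g6⟩ :=
        inner s (fun m hm => hm) (seen ++ [s]) (out ++ [pvSortedI s]) hinv1 hcl1 _ rfl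
      rw [hres]
      refine ⟨?_, ?_, ?_, ?_, g5, ?_⟩
      · rw [g1]
        have hz : out ++ [pvSortedI s] =
            out ++ ([pvSortedI s] : List (List String)).filter (fun c => !(out.contains c)) := by
          congr 1
          simp [List.contains_eq_mem, hsortednot]
        rw [hz, ← List.foldl_map (f := fun m => pvFK d k (s.filter (fun x => x ≠ m)))
          (g := PySem.Set.update),
          pvL _ (by
            intro b hb
            obtain ⟨m, _, rfl⟩ := List.mem_map.mp hb
            exact pvFKNodup d k _) out [pvSortedI s],
          pvFK_good d k s hcov]
        rfl
      · intro t ht; exact g2 t (List.mem_append_left _ ht)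
      · exact g2 s (List.mem_append_right _ (List.mem_singleton.mpr rfl))
      · intro t ht
        rcases g4 t ht with h | h
        · rcases List.mem_append.mp h with h' | h'
          · exact Or.inl h'
          · exact Or.inr (List.mem_singleton.mp h' ▸ List.Sublist.refl _)
        · exact Or.inr h
      · intro t ht htl htg m hm
        rcases g4 t ht with h | h
        · rcases List.mem_append.mp h with h' | h'
          · exact g2 _ (List.mem_append_left _ (hcl t h' htl htg m hm))
          · obtain rfl := List.mem_singleton.mp h'
            exact g3 m hm
        · by_cases he : t = s
          · subst he; exact g3 m hm
          · have hlen : t.length < s.length := by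
              rcases Nat.lt_or_ge t.length s.length with hh | hh
              · exact hh
              · exact absurd (h.eq_of_length (Nat.le_antisymm h.length_le hh)) he
            exact g6 t ht (by omega) htg m hm

-- A and B agree for any duplicate-free dictionary
theorem pvTop (d : List (String × List String)) (k : Int) (hK : (d.map Prod.fst).Nodup) :
    pvShrinkA d k =
      PySem.Set.ofList (pvVisitB d k (d.map Prod.fst) (PySem.Set.empty, [])).2 := by
  have hA : pvShrinkA d k = pvFK d k (d.map Prod.fst) := by
    have h := pvABridge d k hK (d.map Prod.fst).length (d.map Prod.fst) le_rfl
      (List.Sublist.refl _)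
    rw [← h, pvSubSelf d]
  have hinv0 : pvInv d k (d.map Prod.fst) [] [] := by
    refine ⟨?_, ?_, ?_⟩ <;> intro t ht <;> cases ht
  have hcl0 : pvClosed d k [] (d.map Prod.fst).length := by
    intro t ht; cases ht
  obtain ⟨g1, _, _, _, _, _⟩ := pvMain d k (d.map Prod.fst) hK (d.map Prod.fst).length
    (d.map Prod.fst) le_rfl (List.Sublist.refl _) [] [] hinv0 hcl0
  rw [show (PySem.Set.empty : PySem.Set (List String)) = ([] : List (List String)) from rfl, g1]
  simp only [List.nil_append]
  have hfilt : (pvFK d k (d.map Prod.fst)).filter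
      (fun u => !(([] : List (List String)).contains u)) = pvFK d k (d.map Prod.fst) := by
    simp
  rw [hfilt, PySem.Set.ofList_eq_self_of_nodup _ (pvFKNodup d k _), hA]

-- ===== VERDICT (by name: the statement is the Claim_ definition above) =====
theorem shrink_exhaustively_spec : Claim_equal_shrink_exhaustively := by
  unfold Claim_equal_shrink_exhaustively
  intro pre mh k _hdom hpre
  unfold Pre_shrink_exhaustively at hpre
  unfold Spec_shrink_exhaustively
  cases pre with
  | none =>
    show pvShrinkA mh k = PySem.Set.ofList (pvVisitB mh k (mh.map Prod.fst) (PySem.Set.empty, [])).2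
    exact pvTop mh k hpre
  | some ps =>
    show pvShrinkA (mh.filter (fun p => ps.contains p.1)) k =
      PySem.Set.ofList (pvVisitB (mh.filter (fun p => ps.contains p.1)) k
        ((mh.filter (fun p => ps.contains p.1)).map Prod.fst) (PySem.Set.empty, [])).2
    exact pvTop _ k (((List.filter_sublist (l := mh)).map Prod.fst).nodup hpre)
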